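-- pv_equiv track=rewrite | github.com/kindasimple/bigarms | actionlog/lambda_function.py | emoji_action
-- ===== SOURCE A (Python) =====
-- EMOJI_ACTION_MAP = {
--     'flexed_biceps': 'pushups',
-- }
--
-- def emoji_action(emoji_code):
--     if not emoji_code:
--         return
--     if emoji_code in EMOJI_ACTION_MAP:
--         return EMOJI_ACTION_MAP[emoji_code]
--     for emoji, action in EMOJI_ACTION_MAP.items():
--         if emoji_code.startswith(emoji + '_'):
--             return action
-- ===== SOURCE B (Python) =====
-- EMOJI_ACTION_MAP = {
--     'flexed_biceps': 'pushups',
-- }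
--
--
-- def emoji_action(emoji_code):
--     # Longest-first boundary-prefix lookup: try every prefix of emoji_code that
--     # ends at the string end or just before an '_' as a dict key, longest first.
--     if not emoji_code:
--         return None
--     n = len(emoji_code)
--     for i in range(n, 0, -1):
--         if (i == n or emoji_code[i] == '_') and emoji_code[:i] in EMOJI_ACTION_MAP:
--             return EMOJI_ACTION_MAP[emoji_code[:i]]
--     return None
-- ===== Notes on version B (the rewrite author's own statement) =====
-- stated objective: alternative
-- what changed: Instead of scanning the map and testing startswith(key + '_') for each entry, B derives candidate keys from the input itself: it walks boundary positions of emoji_code (string end or just before an '_') longest-first and does a direct dict lookup on each prefix, folding the exact-match case into the longest prefix.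
import Mathlib
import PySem

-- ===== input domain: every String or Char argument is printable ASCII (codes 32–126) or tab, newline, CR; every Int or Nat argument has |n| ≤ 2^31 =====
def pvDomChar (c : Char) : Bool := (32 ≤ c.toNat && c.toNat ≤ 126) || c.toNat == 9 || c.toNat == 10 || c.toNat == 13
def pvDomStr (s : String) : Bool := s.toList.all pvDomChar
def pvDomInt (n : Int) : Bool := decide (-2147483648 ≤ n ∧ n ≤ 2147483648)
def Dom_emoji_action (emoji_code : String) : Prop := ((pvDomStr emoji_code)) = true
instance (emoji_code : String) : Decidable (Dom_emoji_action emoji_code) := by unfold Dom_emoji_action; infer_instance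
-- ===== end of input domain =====

-- B replaces A's scan-of-the-map-with-startswith by a longest-first boundary-prefix dict
-- lookup derived from the input (objective: alternative decomposition, same cost).

-- ===== PORT A =====
def EMOJI_ACTION_MAP : PySem.Dict String String :=
  PySem.Dict.ofList [("flexed_biceps", "pushups")]

-- the 'for emoji, action in EMOJI_ACTION_MAP.items()' loop of A
def emojiActionScan (s : String) : List (String × String) → Option String
  | [] => none
  | (emoji, action) :: rest =>
      if PySem.Str.startswith s (emoji ++ "_") then some action
      else emojiActionScan s rest

def emoji_action (emoji_code : String) : Option String :=
  if emoji_code == "" then none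
  else if EMOJI_ACTION_MAP.contains emoji_code then EMOJI_ACTION_MAP.get? emoji_code
  else emojiActionScan emoji_code EMOJI_ACTION_MAP.items

-- ===== PORT B =====
-- B's 'for i in range(n, 0, -1)' loop; the Nat counter is the current index i
def emojiActionAltLoop (s : String) (n : Int) : Nat → Option String
  | 0 => none
  | j + 1 =>
      let i : Int := ((j + 1 : Nat) : Int)
      let pre := PySem.Str.slice s none (some i)
      if ((i == n) || (PySem.Str.pyGet? s i == some '_')) && EMOJI_ACTION_MAP.contains pre
      then EMOJI_ACTION_MAP.get? pre
      else emojiActionAltLoop s n j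

def emoji_action_alt (emoji_code : String) : Option String :=
  if emoji_code == "" then none
  else
    let n := PySem.Str.len emoji_code
    emojiActionAltLoop emoji_code n n.toNat

-- ===== PRECONDITION & SPEC =====
def Spec_emoji_action (emoji_code : String) (out : Option String) : Prop := out = emoji_action_alt emoji_code
instance (emoji_code : String) (out : Option String) : Decidable (Spec_emoji_action emoji_code out) := by unfold Spec_emoji_action; infer_instance

-- ===== CLAIM (what is proved, stated in full; the proofs are below) =====
def Claim_equal_emoji_action : Prop := ∀ (emoji_code : String), Dom_emoji_action emoji_code → Spec_emoji_action emoji_code (emoji_action emoji_code)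

-- ===== LEMMAS AND PROOFS =====

lemma map_eq : EMOJI_ACTION_MAP = PySem.Dict.mk [("flexed_biceps", "pushups")] := by decide

lemma map_items : EMOJI_ACTION_MAP.items = [("flexed_biceps", "pushups")] := by decide

lemma contains_map (p : String) :
    EMOJI_ACTION_MAP.contains p = (p == "flexed_biceps") := by
  rw [map_eq, PySem.Dict.contains_mk]; simp [List.any, eq_comm]

lemma get?_map (p : String) (h : p = "flexed_biceps") :
    EMOJI_ACTION_MAP.get? p = some "pushups" := by subst h; decide

lemma scan_char (s : String) :
    emojiActionScan s EMOJI_ACTION_MAP.items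
      = if "flexed_biceps_".toList <+: s.toList then some "pushups" else none := by
  rw [map_items]
  show (if PySem.Str.startswith s ("flexed_biceps" ++ "_") then some "pushups"
        else emojiActionScan s []) = _
  have happ : ("flexed_biceps" ++ "_" : String) = "flexed_biceps_" := rfl
  rw [happ, PySem.Str.startswith_eq]
  by_cases h : "flexed_biceps_".toList <+: s.toList
  · rw [if_pos ((PySem.Chars.startswith_iff _ _).2 h), if_pos h]
  · rw [if_neg (fun hc => h ((PySem.Chars.startswith_iff _ _).1 hc)), if_neg h]; rfl

-- A's result, characterised over the character list
lemma A_char (s : String) :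
    emoji_action s =
      if s.toList = [] then none
      else if s.toList = "flexed_biceps".toList ∨ "flexed_biceps_".toList <+: s.toList
      then some "pushups" else none := by
  unfold emoji_action
  rw [contains_map, scan_char]
  by_cases h0 : s = ""
  · subst h0; simp
  · have h0' : s.toList ≠ [] := by
      intro h; exact h0 (String.ext_iff.2 (by simpa using h))
    rw [if_neg (by simpa using h0), if_neg h0']
    by_cases h1 : s = "flexed_biceps"
    · rw [if_pos (by simpa using h1), get?_map s h1,
        if_pos (Or.inl (by rw [h1]))]
    · rw [if_neg (by simpa using h1)]
      by_cases h2 : "flexed_biceps_".toList <+: s.toList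
      · rw [if_pos h2, if_pos (Or.inr h2)]
      · rw [if_neg h2, if_neg (by rintro (h | h); exact h1 (String.ext_iff.2 (by simpa using h)); exact h2 h)]

-- the condition B's loop tests at index m, in propositional form
def altCond (cs : List Char) (m : Nat) : Prop :=
  (m = cs.length ∨ cs[m]? = some '_') ∧ cs.take m = "flexed_biceps".toList

lemma slice_take (s : String) (k : Nat) :
    (PySem.Str.slice s none (some (k : Int))) = "flexed_biceps"
      ↔ s.toList.take k = "flexed_biceps".toList := by
  rw [String.ext_iff, PySem.Str.toList_slice, PySem.Chars.slice_eq_listSlice,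
    PySem.List.slice_to s.toList (Int.natCast_nonneg k)]
  simp

-- B's loop finds a match somewhere iff s is the key or extends the key at an '_' boundary
lemma cond_iff (s : String) :
    (∃ m, 1 ≤ m ∧ m ≤ s.toList.length ∧ altCond s.toList m)
      ↔ (s.toList = "flexed_biceps".toList ∨ "flexed_biceps_".toList <+: s.toList) := by
  have hk : ("flexed_biceps".toList).length = 13 := by decide
  have hk' : ("flexed_biceps_".toList) = "flexed_biceps".toList ++ ['_'] := by decide
  have hk'len : ("flexed_biceps_".toList).length = 14 := by decide
  constructor
  · rintro ⟨m, h1, h2, ⟨hb, ht⟩⟩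
    have hm13 : m = 13 := by
      have hlt := congrArg List.length ht
      rw [List.length_take, hk] at hlt
      omega
    subst hm13
    rcases hb with hb | hb
    · left; rw [← ht, hb, List.take_length]
    · right
      rw [List.prefix_iff_eq_take, hk'len, hk']
      have h14 : s.toList.take (13 + 1) = s.toList.take 13 ++ s.toList[13]?.toList :=
        List.take_succ
      rw [show (14 : Nat) = 13 + 1 from rfl, h14, ht, hb]
      rfl
  · rintro (h | h)
    · refine ⟨13, by omega, ?_, Or.inl ?_, ?_⟩
      · rw [h, hk]
      · rw [h, hk]
      · rw [h, List.take_of_length_le (by rw [hk])]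
    · have ht : "flexed_biceps_".toList = s.toList.take 14 := by
        have := List.prefix_iff_eq_take.1 h
        rwa [hk'len] at this
      have hlen : 14 ≤ s.toList.length := by
        have := h.length_le
        rwa [hk'len] at this
      refine ⟨13, by omega, by omega, Or.inr ?_, ?_⟩
      · have he : s.toList[13]? = ("flexed_biceps_".toList)[13]? := by
          rw [ht, List.getElem?_take]
          simp
        rw [he]; decide
      · have he : s.toList.take 13 = ("flexed_biceps_".toList).take 13 := by
          rw [ht, List.take_take]
          simp
        rw [he]; decide

lemma loop_guard_iff (s : String) (j : Nat) :
    (((((j + 1 : Nat) : Int) == ((s.toList.length : Nat) : Int))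
      || (PySem.Str.pyGet? s ((j + 1 : Nat) : Int) == some '_'))
      && EMOJI_ACTION_MAP.contains (PySem.Str.slice s none (some ((j + 1 : Nat) : Int)))) = true
      ↔ altCond s.toList (j + 1) := by
  rw [contains_map]
  simp only [Bool.and_eq_true, Bool.or_eq_true, beq_iff_eq, Nat.cast_inj,
    PySem.Str.pyGet?_natCast, slice_take, altCond]

lemma loop_some (s : String) (i : Nat)
    (m : Nat) (hm1 : 1 ≤ m) (hmi : m ≤ i) (hc : altCond s.toList m) :
    emojiActionAltLoop s ((s.toList.length : Nat) : Int) i = some "pushups" := by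
  induction i with
  | zero => omega
  | succ j ih =>
    show (if _ then _ else _) = _
    by_cases hg : altCond s.toList (j + 1)
    · rw [if_pos ((loop_guard_iff s j).2 hg)]
      exact get?_map _ ((slice_take s (j+1)).2 hg.2)
    · rw [if_neg (fun h => hg ((loop_guard_iff s j).1 h))]
      exact ih (by rcases Nat.lt_or_ge m (j+1) with h | h; omega;
                   exact absurd (Nat.le_antisymm hmi h ▸ hc) hg)

lemma loop_none (s : String) (i : Nat)
    (h : ∀ m, 1 ≤ m → m ≤ i → ¬ altCond s.toList m) :
    emojiActionAltLoop s ((s.toList.length : Nat) : Int) i = none := by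
  induction i with
  | zero => rfl
  | succ j ih =>
    show (if _ then _ else _) = _
    rw [if_neg (fun hg => h (j+1) (by omega) (le_refl _) ((loop_guard_iff s j).1 hg))]
    exact ih (fun m h1 h2 => h m h1 (by omega))

-- ===== VERDICT (by name: the statement is the Claim_ definition above) =====
theorem emoji_action_spec : Claim_equal_emoji_action := by
  intro s _
  unfold Spec_emoji_action
  rw [A_char]
  unfold emoji_action_alt
  by_cases h0 : s = ""
  · subst h0; rfl
  · have hnil : s.toList ≠ [] := by
      intro h; exact h0 (String.ext_iff.2 (by simpa using h))
    simp only [beq_iff_eq]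
    rw [if_neg hnil, if_neg h0]
    have hn : PySem.Str.len s = ((s.toList.length : Nat) : Int) := by simp
    rw [hn]
    simp only [Int.toNat_natCast]
    by_cases hc : s.toList = "flexed_biceps".toList ∨ "flexed_biceps_".toList <+: s.toList
    · rw [if_pos hc]
      obtain ⟨m, hm1, hm2, hcm⟩ := (cond_iff s).2 hc
      exact (loop_some s _ m hm1 hm2 hcm).symm
    · rw [if_neg hc]
      refine (loop_none s _ ?_).symm
      intro m h1 h2 hcm
      exact hc ((cond_iff s).1 ⟨m, h1, h2, hcm⟩)
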